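-- pv_equiv track=rewrite | github.com/PatoLocos/Erdos530 | experiments/verify_2to1_cpsat.py | compute_witness_pairs
-- ===== SOURCE A (Python) =====
-- from collections import defaultdict
--
-- def compute_witness_pairs(S, A):
--     """
--     For each blocked element x ∈ A\S, compute the witness pairs (a,b) ∈ S×S.
--
--     x is blocked by S means S ∪ {x} is not Sidon.
--     This happens when ∃ collision: x + c = a + b with c ∈ S, a,b ∈ S.
--     The witness pair is the unordered pair {a,b} (or (a,a) if a=b).
--
--     We encode pairs as (min(a,b), max(a,b)) for canonicalization.
--     """
--     S_set = set(S)
--     S_list = sorted(S)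
--
--     # Build sum table for S using ORDERED pairs (a,b) with a,b ∈ S
--     # The axiom maps to S ×ˢ S (cartesian product = ordered pairs)
--     sum_table = defaultdict(list)
--     for a in S_list:
--         for b in S_list:
--             sum_table[a + b].append((a, b))
--
--     blocked = {}
--
--     for x in sorted(A - S_set):
--         pairs = set()
--
--         # x + c = a + b where c ∈ S, (a,b) ORDERED pair in S×S
--         for c in S_list:
--             target = x + c
--             if target in sum_table:
--                 for (a, b) in sum_table[target]:
--                     # Exclude trivial: if {x,c} = {a,b} as multisets
--                     if (x == a and c == b) or (x == b and c == a):
--                         continue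
--                     pairs.add((a, b))
--
--         # Also check: x + x = a + b where a ≠ b, a,b ∈ S (both orderings)
--         target2 = 2 * x
--         if target2 in sum_table:
--             for (a, b) in sum_table[target2]:
--                 if a != b:
--                     pairs.add((a, b))
--
--         if pairs:
--             blocked[x] = pairs
--
--     return blocked
-- ===== SOURCE B (Python) =====
-- def compute_witness_pairs(S, A):
--     """
--     Same result as the sum_table version, but without the precomputed index:
--     for each blocked candidate x and each c in S, solve x + c = a + b for the
--     missing member b = x + c - a and test membership in S; likewise for the
--     x + x = a + b collisions with b = 2*x - a.
--     """
--     S_set = set(S)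
--     S_list = sorted(S)
--     blocked = {}
--     for x in sorted(A - S_set):
--         pairs = set()
--         for c in S_list:
--             for a in S_list:
--                 b = x + c - a
--                 if b in S_set:
--                     pairs.add((a, b))
--         for a in S_list:
--             b = 2 * x - a
--             if b in S_set:
--                 pairs.add((a, b))
--         if pairs:
--             blocked[x] = pairs
--     return blocked
-- ===== Notes on version B (the rewrite author's own statement) =====
-- stated objective: alternative
-- what changed: Dropped the precomputed defaultdict sum_table; for each blocked candidate x, B solves the collision equation x + c = a + b for the missing member (b = x + c - a, resp. b = 2*x - a) and tests membership in the set S directly, so no index is built or looked up.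
import Mathlib
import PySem

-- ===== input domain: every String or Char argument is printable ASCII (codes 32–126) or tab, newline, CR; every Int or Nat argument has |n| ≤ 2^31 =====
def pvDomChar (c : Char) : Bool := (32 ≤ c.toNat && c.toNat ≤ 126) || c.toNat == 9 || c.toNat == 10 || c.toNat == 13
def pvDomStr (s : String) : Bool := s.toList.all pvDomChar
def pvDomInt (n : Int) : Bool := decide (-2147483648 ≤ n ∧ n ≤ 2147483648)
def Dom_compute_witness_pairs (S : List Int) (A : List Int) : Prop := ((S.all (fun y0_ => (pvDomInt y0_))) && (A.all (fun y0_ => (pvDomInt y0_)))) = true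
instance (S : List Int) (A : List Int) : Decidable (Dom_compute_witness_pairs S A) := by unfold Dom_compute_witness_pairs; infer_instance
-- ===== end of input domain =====

-- B drops A's precomputed sum_table index and instead, per blocked candidate x, solves
-- x + c = a + b for the missing member b = x + c - a with a membership test
-- (objective: alternative decomposition, same result).

-- ===== PORT A =====
-- Python A's parameters S and A are sets; per the type convention the lists hold their elements.
-- sum_table: defaultdict(list); sum_table[a+b].append((a,b)) is Dict.modify with default []
def pvA_table (S_list : List Int) : PySem.Dict Int (List (Int × Int)) :=
  S_list.foldl (fun d a =>
    S_list.foldl (fun d b => d.modify (a + b) [] (fun l => l ++ [(a, b)])) d)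
    PySem.Dict.empty

-- the body of A's "for x in sorted(A - S_set)" loop that computes the set `pairs`
def pvA_pairs (sum_table : PySem.Dict Int (List (Int × Int))) (S_list : List Int) (x : Int) :
    PySem.Set (Int × Int) :=
  let pairs0 : PySem.Set (Int × Int) :=
    S_list.foldl (fun pairs c =>
      if sum_table.contains (x + c) then
        (sum_table.getD (x + c) []).foldl (fun pairs p =>
          if (x = p.1 ∧ c = p.2) ∨ (x = p.2 ∧ c = p.1) then pairs
          else PySem.Set.add pairs p) pairs
      else pairs) PySem.Set.empty
  if sum_table.contains (2 * x) then
    (sum_table.getD (2 * x) []).foldl (fun pairs p =>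
      if p.1 ≠ p.2 then PySem.Set.add pairs p else pairs) pairs0
  else pairs0

def compute_witness_pairs (S : List Int) (A : List Int) : List (Int × List (Int × Int)) :=
  let S_set : PySem.Set Int := PySem.Set.ofList S
  let S_list : List Int := PySem.List.sorted S (fun y => y) false
  let sum_table := pvA_table S_list
  let xs : List Int :=
    PySem.List.sorted (PySem.Set.diff (PySem.Set.ofList A) S_set) (fun y => y) false
  (xs.foldl (fun blocked x =>
    let pairs := pvA_pairs sum_table S_list x
    if pairs ≠ [] then blocked.insert x pairs else blocked)
    (PySem.Dict.empty : PySem.Dict Int (List (Int × Int)))).items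

-- ===== PORT B =====
-- the body of B's "for x in sorted(A - S_set)" loop: solve for b and test membership
def pvB_pairs (S_set : PySem.Set Int) (S_list : List Int) (x : Int) : PySem.Set (Int × Int) :=
  let pairs0 : PySem.Set (Int × Int) :=
    S_list.foldl (fun pairs c =>
      S_list.foldl (fun pairs a =>
        if PySem.Set.contains S_set (x + c - a) then PySem.Set.add pairs (a, x + c - a)
        else pairs) pairs) PySem.Set.empty
  S_list.foldl (fun pairs a =>
    if PySem.Set.contains S_set (2 * x - a) then PySem.Set.add pairs (a, 2 * x - a)
    else pairs) pairs0

def compute_witness_pairs_alt (S : List Int) (A : List Int) : List (Int × List (Int × Int)) :=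
  let S_set : PySem.Set Int := PySem.Set.ofList S
  let S_list : List Int := PySem.List.sorted S (fun y => y) false
  let xs : List Int :=
    PySem.List.sorted (PySem.Set.diff (PySem.Set.ofList A) S_set) (fun y => y) false
  (xs.foldl (fun blocked x =>
    let pairs := pvB_pairs S_set S_list x
    if pairs ≠ [] then blocked.insert x pairs else blocked)
    (PySem.Dict.empty : PySem.Dict Int (List (Int × Int)))).items

-- ===== PRECONDITION & SPEC =====
-- S encodes a Python set (py_type set[int]); by the type convention its list holds distinct
-- elements, so Pre_ excludes only list encodings with duplicates, which correspond to no Python input.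
def Pre_compute_witness_pairs (S : List Int) (A : List Int) : Prop := S.Nodup
instance (S : List Int) (A : List Int) : Decidable (Pre_compute_witness_pairs S A) := by unfold Pre_compute_witness_pairs; infer_instance
def pvWitness_compute_witness_pairs : List Int × List Int := ([0, 1, 2, 4], [3, 7, 8])
def Spec_compute_witness_pairs (S : List Int) (A : List Int) (out : List (Int × List (Int × Int))) : Prop := out = compute_witness_pairs_alt S A
instance (S : List Int) (A : List Int) (out : List (Int × List (Int × Int))) : Decidable (Spec_compute_witness_pairs S A out) := by unfold Spec_compute_witness_pairs; infer_instance

-- ===== CLAIM (what is proved, stated in full; the proofs are below) =====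
def Claim_equal_compute_witness_pairs : Prop := ∀ (S : List Int) (A : List Int), Dom_compute_witness_pairs S A → Pre_compute_witness_pairs S A → Spec_compute_witness_pairs S A (compute_witness_pairs S A)

-- ===== LEMMAS AND PROOFS =====

theorem filter_beq_nodup (l : List Int) (v : Int) (h : l.Nodup) :
    l.filter (fun b => b == v) = if v ∈ l then [v] else [] := by
  induction l with
  | nil => simp
  | cons a t ih =>
    simp only [List.nodup_cons] at h
    by_cases hav : a = v
    · subst hav; simp [h.1, ih h.2]
    · simp only [List.filter_cons, List.mem_cons]
      simp [hav, ih h.2, Ne.symm hav]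

theorem prod_filter_eq (M N : List Int) (hN : N.Nodup) (t : Int) :
    (M.flatMap (fun a => N.map (fun b => (a, b)))).filter (fun p => p.1 + p.2 == t)
      = (M.filter (fun a => decide (t - a ∈ N))).map (fun a => (a, t - a)) := by
  induction M with
  | nil => simp
  | cons a m ih =>
    simp only [List.flatMap_cons, List.filter_append, List.filter_cons, ih]
    rw [List.filter_map]
    have h1 : (fun p => p.1 + p.2 == t) ∘ (fun b => ((a : Int), b)) = fun b => b == t - a := by
      funext b; simp only [Function.comp]
      by_cases h : a + b = t
      · simp [h]; omega
      · have : ¬ (b = t - a) := by omega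
        simp [h, this]
    rw [h1, filter_beq_nodup N (t - a) hN]
    by_cases hm : t - a ∈ N
    · simp [hm]
    · simp [hm]

theorem foldl_nested_prod {β : Type} (M N : List Int) (g : Int → Int → β → β) (init : β) :
    M.foldl (fun d a => N.foldl (fun d b => g a b d) d) init
      = (M.flatMap (fun a => N.map (fun b => (a, b)))).foldl (fun d p => g p.1 p.2 d) init := by
  induction M generalizing init with
  | nil => simp
  | cons a m ih =>
    simp only [List.flatMap_cons, List.foldl_append, List.foldl_cons, List.foldl_map, ih]

theorem tableOf_getD (ps : List (Int × Int)) (d : PySem.Dict Int (List (Int × Int))) (t : Int) :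
    (ps.foldl (fun d p => d.modify (p.1 + p.2) [] (fun l => l ++ [p])) d).getD t []
      = d.getD t [] ++ ps.filter (fun p => p.1 + p.2 == t) := by
  induction ps generalizing d with
  | nil => simp
  | cons p ps ih =>
    simp only [List.foldl_cons, ih, PySem.Dict.getD_modify, List.filter_cons]
    by_cases h : t = p.1 + p.2
    · simp [h]
    · have : ¬ (p.1 + p.2 = t) := fun hh => h hh.symm
      simp [h, this]

theorem pvA_table_getD (L : List Int) (hL : L.Nodup) (t : Int) :
    (pvA_table L).getD t []
      = (L.filter (fun a => decide (t - a ∈ L))).map (fun a => (a, t - a)) := by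
  unfold pvA_table
  have hnest := foldl_nested_prod L L
    (fun a b d => d.modify (a + b) [] (fun l => l ++ [(a, b)]))
    (PySem.Dict.empty : PySem.Dict Int (List (Int × Int)))
  simp only [] at hnest
  rw [hnest, tableOf_getD, prod_filter_eq _ _ hL t]
  simp

-- one target's contribution: A's guarded table scan adds exactly the pairs (a, t - a), a ∈ L, t - a ∈ L
theorem pairs_eq (S : List Int) (hN : S.Nodup) (x : Int) (hxS : x ∉ S) :
    pvA_pairs (pvA_table (PySem.List.sorted S (fun y => y) false))
        (PySem.List.sorted S (fun y => y) false) x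
      = pvB_pairs (PySem.Set.ofList S) (PySem.List.sorted S (fun y => y) false) x := by
  set L := PySem.List.sorted S (fun y => y) false with hLdef
  have hL : L.Nodup := ((PySem.List.sorted_perm S (fun y => y) false).symm).nodup hN
  have hxL : x ∉ L := fun h => hxS ((PySem.List.mem_sorted _ _ _ _).mp h)
  have hcont : ∀ v : Int, PySem.Set.contains (PySem.Set.ofList S) v = decide (v ∈ L) := by
    intro v; rw [hLdef]; simp [pysem]
  have hTD := pvA_table_getD L hL
  -- membership facts for elements of the table's group at target t
  have hmem : ∀ (t : Int) (p : Int × Int), p ∈ (pvA_table L).getD t [] →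
      p.1 ∈ L ∧ p.2 ∈ L := by
    intro t p hp
    rw [hTD t] at hp
    rcases List.mem_map.mp hp with ⟨a, ha, rfl⟩
    rcases List.mem_filter.mp ha with ⟨haL, hta⟩
    exact ⟨haL, by simpa using hta⟩
  -- a guarded scan of the table at target t, once A's dead filter is removed
  have hscan : ∀ (t : Int) (acc : PySem.Set (Int × Int))
      (step : PySem.Set (Int × Int) → (Int × Int) → PySem.Set (Int × Int)),
      (∀ acc p, p ∈ (pvA_table L).getD t [] → step acc p = PySem.Set.add acc p) →
      (if (pvA_table L).contains t then ((pvA_table L).getD t []).foldl step acc else acc)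
        = (L.filter (fun a => decide (t - a ∈ L))).foldl
            (fun pairs a => PySem.Set.add pairs (a, t - a)) acc := by
    intro t acc step hstep
    by_cases hc : (pvA_table L).contains t = true
    · simp only [hc, if_true]
      have h1 : ((pvA_table L).getD t []).foldl step acc
          = ((pvA_table L).getD t []).foldl (fun acc p => PySem.Set.add acc p) acc :=
        PySem.List.foldl_congr_mem _ _ _ _ (fun acc p hp => hstep acc p hp)
      rw [h1, hTD t, List.foldl_map]
    · simp only [Bool.not_eq_true] at hc
      have h0 : (pvA_table L).getD t [] = [] :=
        PySem.Dict.getD_of_not_contains _ _ hc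
      have h2 : L.filter (fun a => decide (t - a ∈ L)) = [] :=
        List.map_eq_nil_iff.mp (by rw [← hTD t, h0])
      simp [hc, h2]
  -- B's inner scan over L at target t is the same filtered fold
  have hBscan : ∀ (t : Int) (acc : PySem.Set (Int × Int)),
      L.foldl (fun pairs a =>
        if PySem.Set.contains (PySem.Set.ofList S) (t - a) then
          PySem.Set.add pairs (a, t - a) else pairs) acc
        = (L.filter (fun a => decide (t - a ∈ L))).foldl
            (fun pairs a => PySem.Set.add pairs (a, t - a)) acc := by
    intro t acc
    have hg : L.foldl (fun pairs a =>
        if PySem.Set.contains (PySem.Set.ofList S) (t - a) then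
          PySem.Set.add pairs (a, t - a) else pairs) acc
        = L.foldl (fun pairs a =>
            if decide (t - a ∈ L) then PySem.Set.add pairs (a, t - a) else pairs) acc :=
      PySem.List.foldl_congr_mem _ _ _ _ (fun acc a _ => by rw [hcont (t - a)])
    rw [hg, PySem.List.foldl_if_eq_foldl_filter (p := fun a => decide (t - a ∈ L))
      (f := fun pairs a => PySem.Set.add pairs (a, t - a))]
  unfold pvA_pairs pvB_pairs
  simp only []
  -- the per-c bodies agree, hence the pairs0 accumulators agree
  have h0 : L.foldl (fun pairs c =>
      if (pvA_table L).contains (x + c) then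
        ((pvA_table L).getD (x + c) []).foldl (fun pairs p =>
          if (x = p.1 ∧ c = p.2) ∨ (x = p.2 ∧ c = p.1) then pairs
          else PySem.Set.add pairs p) pairs
      else pairs) PySem.Set.empty
      = L.foldl (fun pairs c =>
          L.foldl (fun pairs a =>
            if PySem.Set.contains (PySem.Set.ofList S) (x + c - a) then
              PySem.Set.add pairs (a, x + c - a) else pairs) pairs) PySem.Set.empty := by
    apply PySem.List.foldl_congr_mem
    intro acc c _
    have hdead : ∀ acc (p : Int × Int), p ∈ (pvA_table L).getD (x + c) [] →
        (if (x = p.1 ∧ c = p.2) ∨ (x = p.2 ∧ c = p.1) then acc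
         else PySem.Set.add acc p) = PySem.Set.add acc p := by
      intro acc p hp
      have hm := hmem (x + c) p hp
      have : ¬ ((x = p.1 ∧ c = p.2) ∨ (x = p.2 ∧ c = p.1)) := by
        rintro (⟨h1, _⟩ | ⟨h1, _⟩)
        · exact hxL (h1 ▸ hm.1)
        · exact hxL (h1 ▸ hm.2)
      rw [if_neg this]
    rw [hscan (x + c) acc _ hdead]
    rw [hBscan (x + c) acc]
  rw [h0]
  -- the 2*x tail agrees
  have hdead2 : ∀ acc (p : Int × Int), p ∈ (pvA_table L).getD (2 * x) [] →
      (if p.1 ≠ p.2 then PySem.Set.add acc p else acc) = PySem.Set.add acc p := by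
    intro acc p hp
    have hm := hmem (2 * x) p hp
    have hne : p.1 ≠ p.2 := by
      intro h
      rcases List.mem_map.mp ((hTD (2 * x)) ▸ hp) with ⟨a, _, rfl⟩
      simp only [] at h
      have : x = a := by omega
      exact hxL (this ▸ hm.1)
    rw [if_pos hne]
  rw [hscan (2 * x) _ _ hdead2, hBscan (2 * x)]

theorem compute_witness_pairs_spec_aux (S A : List Int) (hN : S.Nodup) :
    compute_witness_pairs S A = compute_witness_pairs_alt S A := by
  unfold compute_witness_pairs compute_witness_pairs_alt
  simp only []
  congr 1
  apply PySem.List.foldl_congr_mem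
  intro blocked x hxmem
  have hxS : x ∉ S := by
    intro hxs
    have h1 := (PySem.List.mem_sorted _ (fun y => y) false x).mp hxmem
    have h2 : x ∈ PySem.Set.diff (PySem.Set.ofList A) (PySem.Set.ofList S) := h1
    rw [PySem.Set.mem_diff] at h2
    exact h2.2 ((PySem.Set.mem_ofList _ _).mpr hxs)
  rw [pairs_eq S hN x hxS]

-- ===== VERDICT (by name: the statement is the Claim_ definition above) =====
theorem compute_witness_pairs_spec : Claim_equal_compute_witness_pairs := by
  intro S A _ hpre
  unfold Spec_compute_witness_pairs
  exact compute_witness_pairs_spec_aux S A hpre
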